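-- pv_equiv track=rewrite | github.com/davidpendergast/circuits | src/utils/util.py | _new_bound_size
-- ===== SOURCE A (Python) =====
-- def get_rect_intersect(rect1, rect2):
--     x1 = max(rect1[0], rect2[0])
--     x2 = min(rect1[0] + rect1[2], rect2[0] + rect2[2])
--     y1 = max(rect1[1], rect2[1])
--     y2 = min(rect1[1] + rect1[3], rect2[1] + rect2[3])
--     if x1 >= x2 or y1 >= y2:
--         return None
--     else:
--         return get_rect_containing_points([(x1, y1), (x2, y2)])
--
-- def get_rect_containing_points(pts, inclusive=False):
--     if len(pts) == 0:
--         raise ValueError("pts is empty")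
--     else:
--         min_x = pts[0][0]
--         max_x = pts[0][0]
--         min_y = pts[0][1]
--         max_y = pts[0][1]
--
--         for pt in pts:
--             min_x = min(min_x, pt[0])
--             max_x = max(max_x, pt[0])
--             min_y = min(min_y, pt[1])
--             max_y = max(max_y, pt[1])
--
--         if inclusive:
--             max_x += 1
--             max_y += 1
--
--         return [min_x, min_y, (max_x - min_x), (max_y - min_y)]
--
-- def _new_bound_size(existing_rects, new_rect):
--     min_x = new_rect[0]
--     max_x = new_rect[0] + new_rect[2]
--     min_y = new_rect[1]
--     max_y = new_rect[1] + new_rect[3]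
--     for r in existing_rects:
--         if get_rect_intersect(r, new_rect) is not None:
--             return None
--         else:
--             min_x = min(min_x, r[0])
--             max_x = max(max_x, r[0] + r[2])
--             min_y = min(min_y, r[1])
--             max_y = max(max_y, r[1] + r[3])
--
--     return (max_x - min_x, max_y - min_y)
-- ===== SOURCE B (Python) =====
-- def _rects_overlap(a, b):
--     return (max(a[0], b[0]) < min(a[0] + a[2], b[0] + b[2])
--             and max(a[1], b[1]) < min(a[1] + a[3], b[1] + b[3]))
--
--
-- def _new_bound_size(existing_rects, new_rect):
--     if any(_rects_overlap(r, new_rect) for r in existing_rects):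
--         return None
--     rects = [new_rect] + list(existing_rects)
--     min_x = min(r[0] for r in rects)
--     max_x = max(r[0] + r[2] for r in rects)
--     min_y = min(r[1] for r in rects)
--     max_y = max(r[1] + r[3] for r in rects)
--     return (max_x - min_x, max_y - min_y)
-- ===== Notes on version B (the rewrite author's own statement) =====
-- stated objective: simpler
-- what changed: Splits A's fused loop into a separate any() overlap test plus independent min/max reductions over all rect edges (including new_rect), replacing the guard-and-accumulate loop with two plain passes.
import Mathlib
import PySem

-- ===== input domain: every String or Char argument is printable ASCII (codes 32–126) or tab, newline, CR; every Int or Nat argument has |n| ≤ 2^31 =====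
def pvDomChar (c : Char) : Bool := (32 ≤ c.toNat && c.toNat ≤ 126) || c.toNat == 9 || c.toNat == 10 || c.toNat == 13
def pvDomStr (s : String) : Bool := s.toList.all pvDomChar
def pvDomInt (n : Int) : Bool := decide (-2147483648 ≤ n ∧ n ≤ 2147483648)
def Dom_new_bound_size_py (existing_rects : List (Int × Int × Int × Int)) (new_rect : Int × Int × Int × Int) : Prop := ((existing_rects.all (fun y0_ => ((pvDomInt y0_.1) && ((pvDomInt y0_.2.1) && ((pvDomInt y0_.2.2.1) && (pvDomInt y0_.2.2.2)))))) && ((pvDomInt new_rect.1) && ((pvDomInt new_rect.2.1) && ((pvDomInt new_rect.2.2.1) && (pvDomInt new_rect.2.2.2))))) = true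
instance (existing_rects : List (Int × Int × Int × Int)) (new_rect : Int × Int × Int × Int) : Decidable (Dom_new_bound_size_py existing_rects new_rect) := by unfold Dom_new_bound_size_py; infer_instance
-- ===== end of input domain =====

-- B splits A's fused loop into a separate overlap existence check plus independent
-- min/max reductions over all rects including new_rect (objective: simpler decomposition).

-- ===== PORT A =====
-- port of get_rect_containing_points (inclusive=False as used here); raises on [] → none
def get_rect_containing_points (pts : List (Int × Int)) : Option (Int × Int × Int × Int) :=
  match pts with
  | [] => none
  | p0 :: _ =>
    let st := pts.foldl
      (fun (s : Int × Int × Int × Int) pt =>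
        (min s.1 pt.1, max s.2.1 pt.1, min s.2.2.1 pt.2, max s.2.2.2 pt.2))
      (p0.1, p0.1, p0.2, p0.2)
    some (st.1, st.2.2.1, st.2.1 - st.1, st.2.2.2 - st.2.2.1)

def get_rect_intersect (rect1 rect2 : Int × Int × Int × Int) : Option (Int × Int × Int × Int) :=
  let x1 := max rect1.1 rect2.1
  let x2 := min (rect1.1 + rect1.2.2.1) (rect2.1 + rect2.2.2.1)
  let y1 := max rect1.2.1 rect2.2.1
  let y2 := min (rect1.2.1 + rect1.2.2.2) (rect2.2.1 + rect2.2.2.2)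
  if x1 ≥ x2 ∨ y1 ≥ y2 then none
  else get_rect_containing_points [(x1, y1), (x2, y2)]

-- A's loop with early return, as structural recursion over the remaining rects
def nbs_loop (new_rect : Int × Int × Int × Int) :
    List (Int × Int × Int × Int) → Int → Int → Int → Int → Option (Int × Int)
  | [], min_x, max_x, min_y, max_y => some (max_x - min_x, max_y - min_y)
  | r :: rs, min_x, max_x, min_y, max_y =>
    if (get_rect_intersect r new_rect).isSome then none
    else nbs_loop new_rect rs (min min_x r.1) (max max_x (r.1 + r.2.2.1))
          (min min_y r.2.1) (max max_y (r.2.1 + r.2.2.2))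

def new_bound_size_py (existing_rects : List (Int × Int × Int × Int)) (new_rect : Int × Int × Int × Int) : Option (Int × Int) :=
  nbs_loop new_rect existing_rects new_rect.1 (new_rect.1 + new_rect.2.2.1)
    new_rect.2.1 (new_rect.2.1 + new_rect.2.2.2)

-- ===== PORT B =====
def rects_overlap (a b : Int × Int × Int × Int) : Bool :=
  decide (max a.1 b.1 < min (a.1 + a.2.2.1) (b.1 + b.2.2.1)) &&
  decide (max a.2.1 b.2.1 < min (a.2.1 + a.2.2.2) (b.2.1 + b.2.2.2))

def new_bound_size_py_alt (existing_rects : List (Int × Int × Int × Int)) (new_rect : Int × Int × Int × Int) : Option (Int × Int) :=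
  if existing_rects.any (fun r => rects_overlap r new_rect) then none
  else
    -- rects = [new_rect] + existing_rects; Python's min/max over a nonempty list
    -- is a fold starting from the first element (new_rect's value)
    let min_x := (existing_rects.map (fun r => r.1)).foldl min new_rect.1
    let max_x := (existing_rects.map (fun r => r.1 + r.2.2.1)).foldl max (new_rect.1 + new_rect.2.2.1)
    let min_y := (existing_rects.map (fun r => r.2.1)).foldl min new_rect.2.1
    let max_y := (existing_rects.map (fun r => r.2.1 + r.2.2.2)).foldl max (new_rect.2.1 + new_rect.2.2.2)
    some (max_x - min_x, max_y - min_y)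

-- ===== PRECONDITION & SPEC =====
def Spec_new_bound_size_py (existing_rects : List (Int × Int × Int × Int)) (new_rect : Int × Int × Int × Int) (out : Option (Int × Int)) : Prop := out = new_bound_size_py_alt existing_rects new_rect
instance (existing_rects : List (Int × Int × Int × Int)) (new_rect : Int × Int × Int × Int) (out : Option (Int × Int)) : Decidable (Spec_new_bound_size_py existing_rects new_rect out) := by unfold Spec_new_bound_size_py; infer_instance

-- ===== CLAIM (what is proved, stated in full; the proofs are below) =====
def Claim_equal_new_bound_size_py : Prop := ∀ (existing_rects : List (Int × Int × Int × Int)) (new_rect : Int × Int × Int × Int), Dom_new_bound_size_py existing_rects new_rect → Spec_new_bound_size_py existing_rects new_rect (new_bound_size_py existing_rects new_rect)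

-- ===== LEMMAS AND PROOFS =====
lemma intersect_isSome (r nr : Int × Int × Int × Int) :
    (get_rect_intersect r nr).isSome = rects_overlap r nr := by
  simp only [get_rect_intersect, get_rect_containing_points, rects_overlap, ge_iff_le]
  split_ifs with h <;> simp <;> omega

lemma nbs_loop_eq (nr : Int × Int × Int × Int) (ex : List (Int × Int × Int × Int))
    (mx Mx my My : Int) :
    nbs_loop nr ex mx Mx my My =
      if ex.any (fun r => rects_overlap r nr) then none
      else some (((ex.map (fun r => r.1 + r.2.2.1)).foldl max Mx)
                   - ((ex.map (fun r => r.1)).foldl min mx),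
                 ((ex.map (fun r => r.2.1 + r.2.2.2)).foldl max My)
                   - ((ex.map (fun r => r.2.1)).foldl min my)) := by
  induction ex generalizing mx Mx my My with
  | nil => simp [nbs_loop]
  | cons r rs ih =>
    simp only [nbs_loop, intersect_isSome, List.any_cons, List.map_cons, List.foldl_cons,
      Bool.or_eq_true]
    by_cases h : rects_overlap r nr = true
    · simp [h]
    · rw [ih]; simp only [eq_false h, false_or, if_false]

-- ===== VERDICT (by name: the statement is the Claim_ definition above) =====
theorem new_bound_size_py_spec : Claim_equal_new_bound_size_py := by
  intro ex nr _
  unfold Spec_new_bound_size_py new_bound_size_py new_bound_size_py_alt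
  rw [nbs_loop_eq]
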